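-- pv_equiv track=rewrite | github.com/alxwen711/contestSubmissionArchive | codeforces/live contests/2025-2/1019/d2.py | gentranslators
-- ===== SOURCE A (Python) =====
-- def gentranslators(n,ans):
--     index = 0
--     encode = [-1]*n
--     decode = [-1]
--     for i in range(n):
--         if ans[i] == 0:
--             index += 1
--             encode[i] = index
--             decode.append(i)
--     return encode,decode,index
-- ===== SOURCE B (Python) =====
-- def gentranslators(n, ans):
--     # prefix-count "gather" strategy: counts[i] = number of zeros among ans[:i];
--     # encode is computed positionally from counts (no scatter-assignment into a
--     # preallocated array), decode and the total come from the same data.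
--     c = 0
--     counts = []
--     for i in range(n):
--         counts.append(c)
--         if ans[i] == 0:
--             c += 1
--     encode = [counts[i] + 1 if ans[i] == 0 else -1 for i in range(n)]
--     decode = [-1] + [i for i in range(n) if ans[i] == 0]
--     return encode, decode, c
-- ===== Notes on version B (the rewrite author's own statement) =====
-- stated objective: alternative
-- what changed: Replaces A's fused scatter loop (mutating a preallocated encode array and appending to decode while carrying a running index) with a prefix-count gather: first a prefix-sum array counts of zeros-so-far, then encode is computed positionally from counts by a comprehension and decode/index are derived separately.
import Mathlib
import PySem

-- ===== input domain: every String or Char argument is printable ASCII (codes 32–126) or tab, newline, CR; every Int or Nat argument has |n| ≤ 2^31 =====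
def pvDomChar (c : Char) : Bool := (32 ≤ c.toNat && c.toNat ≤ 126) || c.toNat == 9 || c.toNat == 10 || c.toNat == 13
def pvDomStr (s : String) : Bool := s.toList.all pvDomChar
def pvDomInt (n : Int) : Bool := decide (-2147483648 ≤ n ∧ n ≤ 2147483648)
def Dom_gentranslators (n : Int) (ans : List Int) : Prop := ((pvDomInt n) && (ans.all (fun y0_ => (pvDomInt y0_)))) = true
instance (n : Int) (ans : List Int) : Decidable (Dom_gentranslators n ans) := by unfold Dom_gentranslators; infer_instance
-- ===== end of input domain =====

-- B replaces A's fused scatter loop (preallocated encode mutated in place, decode appended,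
-- running index) with a prefix-count gather: counts of zeros-so-far, then encode computed
-- positionally from counts; alternative structure, same cost.


-- ===== PORT A =====
-- literal port of A: one loop over range(n) updating (index, encode, decode);
-- under Pre_ every read ans[i] is in range, so pyGetD's default (1, nonzero) is never used.
def gentranslators (n : Int) (ans : List Int) : List Int × List Int × Int :=
  let s := (PySem.List.pyRange 0 n 1).foldl
    (fun (s : Int × List Int × List Int) i =>
      if PySem.List.pyGetD ans i 1 == 0 then
        (s.1 + 1, s.2.1.set i.toNat (s.1 + 1), s.2.2 ++ [i])
      else s)
    (0, List.replicate n.toNat (-1), [-1])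
  (s.2.1, s.2.2, s.1)

-- ===== PORT B =====
-- literal port of B: build the prefix-count list counts (counts[i] = zeros among ans[:i])
-- with its running total c, then gather encode from counts, decode and index separately.
def gentranslators_alt (n : Int) (ans : List Int) : List Int × List Int × Int :=
  let s := (PySem.List.pyRange 0 n 1).foldl
    (fun (s : Int × List Int) i =>
      let counts := s.2 ++ [s.1]
      if PySem.List.pyGetD ans i 1 == 0 then (s.1 + 1, counts) else (s.1, counts))
    (0, [])
  let c := s.1
  let counts := s.2
  let encode := (PySem.List.pyRange 0 n 1).map
    (fun i => if PySem.List.pyGetD ans i 1 == 0 then PySem.List.pyGetD counts i 0 + 1 else -1)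
  let decode := [-1] ++ (PySem.List.pyRange 0 n 1).filter (fun i => PySem.List.pyGetD ans i 1 == 0)
  (encode, decode, c)

-- ===== PRECONDITION & SPEC =====
-- A (and B) raise IndexError exactly when some i < n is out of range of ans, i.e. when len(ans) < n.
def Pre_gentranslators (n : Int) (ans : List Int) : Prop := n ≤ (ans.length : Int)
instance (n : Int) (ans : List Int) : Decidable (Pre_gentranslators n ans) := by unfold Pre_gentranslators; infer_instance
def pvWitness_gentranslators : Int × List Int := (3, [0, 1, 0])

def Spec_gentranslators (n : Int) (ans : List Int) (out : List Int × List Int × Int) : Prop := out = gentranslators_alt n ans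
instance (n : Int) (ans : List Int) (out : List Int × List Int × Int) : Decidable (Spec_gentranslators n ans out) := by unfold Spec_gentranslators; infer_instance

-- ===== CLAIM (what is proved, stated in full; the proofs are below) =====
def Claim_equal_gentranslators : Prop := ∀ (n : Int) (ans : List Int), Dom_gentranslators n ans → Pre_gentranslators n ans → Spec_gentranslators n ans (gentranslators n ans)

-- ===== LEMMAS AND PROOFS =====

-- the zero test both loops make at position i
def pvZero (ans : List Int) (i : Int) : Bool := PySem.List.pyGetD ans i 1 == 0
-- the integer range [0, m) and its zero positions
def pvR (m : Nat) : List Int := List.map (fun k : Nat => (k : Int)) (List.range m)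
def pvZ (ans : List Int) (m : Nat) : List Int := (pvR m).filter (pvZero ans)
-- A's encode after processing the first m indices (N = n as a Nat)
def pvE (ans : List Int) (N m : Nat) : List Int :=
  (List.range N).map (fun j =>
    if j < m then (if pvZero ans ((j : Nat) : Int) then ((pvZ ans j).length : Int) + 1 else -1) else -1)

theorem pvR_succ (m : Nat) : pvR (m + 1) = pvR m ++ [(m : Int)] := by
  simp [pvR, List.range_succ]

theorem pvZ_succ (ans : List Int) (m : Nat) :
    pvZ ans (m + 1) = pvZ ans m ++ (if pvZero ans (m : Int) then [(m : Int)] else []) := by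
  by_cases h : pvZero ans (m : Int) <;> simp [pvZ, pvR_succ, List.filter_append, h]

theorem pvE_zero (ans : List Int) (N : Nat) : pvE ans N 0 = List.replicate N (-1) := by
  simp [pvE, List.map_const']

theorem pvE_succ_pos (ans : List Int) (N m : Nat) (hm : m < N) (hz : pvZero ans (m : Int)) :
    pvE ans N (m + 1) = (pvE ans N m).set m (((pvZ ans m).length : Int) + 1) := by
  apply List.ext_getElem
  · simp [pvE]
  · intro j h1 h2
    have hj : j < N := by simp [pvE] at h1; exact h1
    by_cases hje : j = m
    · subst hje
      simp [pvE, hz]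
    · simp only [pvE, List.getElem_set, List.getElem_map, List.getElem_range]
      rw [if_neg (show ¬ m = j from fun h => hje h.symm)]
      have h3 : (j < m + 1) ↔ (j < m) := by omega
      simp [h3]

theorem pvE_succ_neg (ans : List Int) (N m : Nat) (hz : ¬ pvZero ans (m : Int)) :
    pvE ans N (m + 1) = pvE ans N m := by
  apply List.map_congr_left
  intro j hj
  by_cases hje : j = m
  · subst hje; simp [hz]
  · have : (j < m + 1) ↔ (j < m) := by omega
    simp [this]

-- A's loop after the first m indices: the running index, encode, and decode
theorem pvAfold (ans : List Int) (N : Nat) : ∀ (m : Nat), m ≤ N →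
    (pvR m).foldl
      (fun (s : Int × List Int × List Int) i =>
        if PySem.List.pyGetD ans i 1 == 0 then
          (s.1 + 1, s.2.1.set i.toNat (s.1 + 1), s.2.2 ++ [i])
        else s)
      (0, List.replicate N (-1), [-1])
    = (((pvZ ans m).length : Int), pvE ans N m, -1 :: pvZ ans m) := by
  intro m
  induction m with
  | zero => intro _; simp [pvR, pvZ, pvE_zero]
  | succ m ih =>
    intro h
    have hmN : m < N := by omega
    rw [pvR_succ, List.foldl_append]
    rw [ih (by omega)]
    by_cases hz : pvZero ans (m : Int)
    · have hz' : PySem.List.pyGetD ans (m : Int) 1 == 0 := hz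
      simp only [List.foldl_cons, List.foldl_nil, hz']
      rw [pvZ_succ, pvE_succ_pos ans N m hmN hz]
      simp [hz]
    · have hz' : ¬ (PySem.List.pyGetD ans (m : Int) 1 == 0) := hz
      simp only [List.foldl_cons, List.foldl_nil]
      rw [if_neg (by simpa using hz')]
      rw [pvZ_succ, pvE_succ_neg ans N m hz]
      simp [hz]

-- B's counting loop: the running total and the prefix-count list
theorem pvBfold (ans : List Int) : ∀ (m : Nat),
    (pvR m).foldl
      (fun (s : Int × List Int) i =>
        let counts := s.2 ++ [s.1]
        if PySem.List.pyGetD ans i 1 == 0 then (s.1 + 1, counts) else (s.1, counts))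
      (0, [])
    = (((pvZ ans m).length : Int), (List.range m).map (fun j => ((pvZ ans j).length : Int))) := by
  intro m
  induction m with
  | zero => simp [pvR, pvZ]
  | succ m ih =>
    rw [pvR_succ, List.foldl_append, ih]
    by_cases hz : pvZero ans (m : Int)
    · have hz' : PySem.List.pyGetD ans (m : Int) 1 == 0 := hz
      simp only [List.foldl_cons, List.foldl_nil, hz']
      rw [pvZ_succ]
      simp [hz, List.range_succ]
    · have hz' : ¬ (PySem.List.pyGetD ans (m : Int) 1 == 0) := hz
      simp only [List.foldl_cons, List.foldl_nil]
      rw [if_neg (by simpa using hz')]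
      rw [pvZ_succ]
      simp [hz, List.range_succ]

-- B's gather of encode from counts equals A's filled encode at m = N
theorem pvGather (ans : List Int) (N : Nat) :
    (pvR N).map (fun i =>
        if PySem.List.pyGetD ans i 1 == 0 then
          PySem.List.pyGetD ((List.range N).map (fun j => ((pvZ ans j).length : Int))) i 0 + 1
        else -1)
    = pvE ans N N := by
  rw [pvR, pvE, List.map_map]
  apply List.map_congr_left
  intro j hj
  have hjN : j < N := List.mem_range.mp hj
  by_cases hz : pvZero ans (j : Int)
  · have hz' : PySem.List.pyGetD ans (j : Int) 1 == 0 := hz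
    simp only [Function.comp_apply, hz', if_true, if_pos hjN, if_pos hz]
    rw [PySem.List.pyGetD_natCast]
    rw [List.getD_eq_getElem _ _ (by simpa using hjN)]
    simp
  · have hz' : ¬ (PySem.List.pyGetD ans (j : Int) 1 == 0) := hz
    simp only [Function.comp_apply]
    rw [if_neg (by simpa using hz'), if_pos hjN, if_neg (by simpa using hz)]

theorem pvRange_eq (n : Int) : PySem.List.pyRange 0 n 1 = pvR n.toNat := by
  by_cases h : 0 ≤ n
  · have h2 := PySem.List.pyRange_zero_natCast n.toNat
    rw [show ((n.toNat : Nat) : Int) = n from by omega] at h2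
    rw [h2]; simp [pvR]
  · have h1 : PySem.List.pyRange 0 n 1 = [] := by
      simp [PySem.List.pyRange]; omega
    have h2 : n.toNat = 0 := by omega
    simp [h1, h2, pvR]

-- ===== VERDICT (by name: the statement is the Claim_ definition above) =====
theorem gentranslators_spec : Claim_equal_gentranslators := by
  intro n ans _ _
  unfold Spec_gentranslators gentranslators gentranslators_alt
  rw [pvRange_eq]
  rw [pvAfold ans n.toNat n.toNat le_rfl, pvBfold ans n.toNat]
  simp only [pvGather]
  simp [pvZ]
  rfl
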